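-- pv_equiv track=rewrite | github.com/SEA-PHAGES/pde_utils | src/pde_utils/pipelines/cluster_db.py | gen_new_cluster
-- ===== SOURCE A (Python) =====
-- import string
--
-- def gen_new_cluster(old_clusters, cluster_prefix=None):
--     if cluster_prefix is None:
--         cluster_prefix = ""
--     alphabet = string.ascii_uppercase
--
--     chars = 1
--     counter = []
--     while True:
--         filled = True
--         if chars > len(counter):
--             for _ in range(chars - len(counter)):
--                 counter.append(0)
--
--         letters = [cluster_prefix]
--         for char_num in counter:
--             letters.append(alphabet[char_num])
--
--         new_cluster = "".join(letters)
--         if new_cluster not in old_clusters: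
--             return new_cluster
--
--         for i in range(len(counter)):
--             if counter[len(counter)-1-i] < (len(alphabet) - 1):
--                 counter[len(counter)-1-i] += 1
--                 filled = False
--                 break
--
--             counter[len(counter)-1-i] = 0
--
--         if filled:
--             chars += 1
--             if chars >= 5:
--                 break
-- ===== SOURCE B (Python) =====
-- import string
--
--
-- def _names(prefix, length):
--     # yield prefix extended by every length-letter uppercase suffix, in lexicographic order
--     if length == 0:
--         yield prefix
--     else:
--         for ch in string.ascii_uppercase:
--             yield from _names(prefix + ch, length - 1)
--
--
-- def gen_new_cluster(old_clusters, cluster_prefix=None):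
--     if cluster_prefix is None:
--         cluster_prefix = ""
--     for length in range(1, 5):
--         for name in _names(cluster_prefix, length):
--             if name not in old_clusters:
--                 return name
--     return None
-- ===== Notes on version B (the rewrite author's own statement) =====
-- stated objective: simpler
-- what changed: Replaced the manual base-26 odometer (counter list, carry loop, padding, filled flag) by a recursive generator that yields prefix+suffix names of each length 1..4 in lexicographic order, scanned with a plain for/return.
import Mathlib
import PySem

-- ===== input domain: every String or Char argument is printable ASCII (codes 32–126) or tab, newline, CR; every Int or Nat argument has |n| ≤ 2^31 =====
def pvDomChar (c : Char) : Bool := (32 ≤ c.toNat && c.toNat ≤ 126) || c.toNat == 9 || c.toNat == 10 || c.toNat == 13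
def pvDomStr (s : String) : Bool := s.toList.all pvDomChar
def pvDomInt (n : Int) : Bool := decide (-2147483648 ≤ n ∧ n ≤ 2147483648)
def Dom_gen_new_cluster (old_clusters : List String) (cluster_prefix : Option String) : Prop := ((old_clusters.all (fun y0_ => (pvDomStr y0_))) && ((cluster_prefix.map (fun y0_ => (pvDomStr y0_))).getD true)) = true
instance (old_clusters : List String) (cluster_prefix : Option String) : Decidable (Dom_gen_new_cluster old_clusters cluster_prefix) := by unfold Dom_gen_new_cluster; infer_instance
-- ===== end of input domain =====

-- B replaces A's manual base-26 odometer (counter list, carry loop, padding, filled flag)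
-- by a recursive generator of prefix+suffix names per length 1..4, scanned in order: simpler.

-- ===== PORT A =====
-- string.ascii_uppercase
def pvAlph : List Char := "ABCDEFGHIJKLMNOPQRSTUVWXYZ".toList

-- alphabet[char_num]; the counter digits are always < 26, so the default is never used
def pvChr (d : Nat) : Char := pvAlph.getD d 'A'

-- A's inner carry for-loop: scan the counter from the rightmost digit; first digit < 25 is
-- incremented and everything to its right zeroed; none = every digit was 25 ('filled')
def pvInc : List Nat → Option (List Nat)
  | [] => none
  | d :: rest =>
    match pvInc rest with
    | some r => some (d :: r)
    | none => if d < 25 then some ((d + 1) :: List.replicate rest.length 0) else none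

-- A's 'while True' loop; fuel only makes the recursion total (500000 ≥ the 475254 candidates)
def pvLoopA (old : List String) (p : String) : Nat → Nat → List Nat → Option String
  | 0, _, _ => none
  | fuel + 1, chars, counter =>
    let counter := counter ++ List.replicate (chars - counter.length) 0
    let new_cluster := p ++ String.ofList (counter.map pvChr)
    if !(old.contains new_cluster) then some new_cluster
    else
      match pvInc counter with
      | some c' => pvLoopA old p fuel chars c'
      | none =>
        if chars + 1 ≥ 5 then none
        else pvLoopA old p fuel (chars + 1) (List.replicate counter.length 0)

def gen_new_cluster (old_clusters : List String) (cluster_prefix : Option String) : Option String :=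
  pvLoopA old_clusters (cluster_prefix.getD "") 500000 1 []

-- ===== PORT B =====
-- _names(prefix, length): all strings prefix ++ (length uppercase letters), lexicographic
def pvNames (pre : String) : Nat → List String
  | 0 => [pre]
  | n + 1 => pvAlph.flatMap (fun ch => pvNames (pre.push ch) n)

def gen_new_cluster_alt (old_clusters : List String) (cluster_prefix : Option String) : Option String :=
  let p := cluster_prefix.getD ""
  ((List.range' 1 4).flatMap (fun length => pvNames p length)).find?
    (fun name => !(old_clusters.contains name))

-- ===== PRECONDITION & SPEC =====
def Spec_gen_new_cluster (old_clusters : List String) (cluster_prefix : Option String) (out : Option String) : Prop := out = gen_new_cluster_alt old_clusters cluster_prefix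
instance (old_clusters : List String) (cluster_prefix : Option String) (out : Option String) : Decidable (Spec_gen_new_cluster old_clusters cluster_prefix out) := by unfold Spec_gen_new_cluster; infer_instance

-- ===== CLAIM (what is proved, stated in full; the proofs are below) =====
def Claim_equal_gen_new_cluster : Prop := ∀ (old_clusters : List String) (cluster_prefix : Option String), Dom_gen_new_cluster old_clusters cluster_prefix → Spec_gen_new_cluster old_clusters cluster_prefix (gen_new_cluster old_clusters cluster_prefix)

-- ===== LEMMAS AND PROOFS =====

-- all length-n digit strings (digits < 26) in lexicographic order
def pvTuples : Nat → List (List Nat)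
  | 0 => [[]]
  | n + 1 => (List.range 26).flatMap (fun d => (pvTuples n).map (d :: ·))

-- all length-(c.length) digit strings ≥ c in lexicographic order
def pvFrom : List Nat → List (List Nat)
  | [] => [[]]
  | d :: rest =>
      (pvFrom rest).map (d :: ·) ++
      (List.range' (d + 1) (25 - d)).flatMap (fun e => (pvTuples rest.length).map (e :: ·))

-- digit strings of the lengths still to come after length n
def pvRest (n : Nat) : List (List Nat) := (List.range' (n + 1) (4 - n)).flatMap pvTuples

def pvToStr (p : String) (t : List Nat) : String := p ++ String.ofList (t.map pvChr)

lemma pvInc_length : ∀ c c', pvInc c = some c' → c'.length = c.length := by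
  intro c
  induction c with
  | nil => intro c' h; simp [pvInc] at h
  | cons d rest ih =>
    intro c' h
    simp only [pvInc] at h
    cases hr : pvInc rest with
    | some r => rw [hr] at h; cases h; simp [ih r hr]
    | none =>
      rw [hr] at h
      by_cases hd : d < 25
      · simp [hd] at h; cases h; simp
      · simp [hd] at h

lemma pvInc_lt : ∀ c c', (∀ d ∈ c, d < 26) → pvInc c = some c' → ∀ d ∈ c', d < 26 := by
  intro c
  induction c with
  | nil => intro c' _ h; simp [pvInc] at h
  | cons d rest ih =>
    intro c' hlt h
    simp only [pvInc] at h
    cases hr : pvInc rest with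
    | some r =>
      rw [hr] at h; cases h
      intro e he
      rcases List.mem_cons.1 he with h1 | h2
      · exact h1 ▸ hlt d (by simp)
      · exact ih r (fun x hx => hlt x (by simp [hx])) hr e h2
    | none =>
      rw [hr] at h
      by_cases hd : d < 25
      · simp [hd] at h; cases h
        intro e he
        rcases List.mem_cons.1 he with h1 | h2
        · omega
        · simp [List.eq_of_mem_replicate h2]
      · simp [hd] at h

lemma pvFrom_zero : ∀ n, pvFrom (List.replicate n 0) = pvTuples n := by
  intro n
  induction n with
  | zero => simp [pvFrom, pvTuples]
  | succ n ih =>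
    have : List.replicate (n + 1) 0 = 0 :: List.replicate n 0 := by simp [List.replicate]
    rw [this]
    simp only [pvFrom, ih, List.length_replicate, pvTuples]
    have h26 : List.range 26 = 0 :: List.range' 1 25 := by decide
    rw [h26, List.flatMap_cons]

lemma pvFrom_step : ∀ c, (∀ d ∈ c, d < 26) →
    pvFrom c = c :: (match pvInc c with | some c' => pvFrom c' | none => []) := by
  intro c
  induction c with
  | nil => intro _; simp [pvFrom, pvInc]
  | cons d rest ih =>
    intro hlt
    have hrest : ∀ x ∈ rest, x < 26 := fun x hx => hlt x (by simp [hx])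
    have hih := ih hrest
    cases hr : pvInc rest with
    | some r =>
      rw [hr] at hih
      have hlen := pvInc_length rest r hr
      simp only [pvFrom, pvInc, hr, hih, List.map_cons, List.cons_append, hlen]
    | none =>
      rw [hr] at hih
      by_cases hd : d < 25
      · have h1 : 25 - d = (24 - d) + 1 := by omega
        have h2 : List.range' (d + 1) (25 - d) = (d + 1) :: List.range' (d + 2) (24 - d) := by
          rw [h1, List.range'_succ]
        simp only [pvFrom, pvInc, hr, hih, hd, if_pos, List.map_cons, List.map_nil,
          List.cons_append, List.nil_append, h2, List.flatMap_cons, pvFrom_zero,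
          List.length_replicate]
        have h3 : 25 - (d + 1) = 24 - d := by omega
        rw [h3]
      · have hd25 : d = 25 := by have := hlt d (by simp); omega
        have h0 : 25 - d = 0 := by omega
        simp [pvFrom, pvInc, hr, hih, hd, h0]

lemma pvFrom_ne_nil (c : List Nat) (h : ∀ d ∈ c, d < 26) : pvFrom c ≠ [] := by
  rw [pvFrom_step c h]; simp

-- length facts for the fuel bound
lemma pvTuples_length : ∀ n, (pvTuples n).length = 26 ^ n := by
  intro n
  induction n with
  | zero => simp [pvTuples]
  | succ n ih =>
    have h : ((List.range 26).map fun d => ((pvTuples n).map (d :: ·)).length) =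
        List.replicate 26 (26 ^ n) := by
      simp [ih, List.map_const']
    simp only [pvTuples, List.length_flatMap, h, List.sum_replicate, smul_eq_mul]
    ring

-- main loop lemma: A's loop walks the remaining candidate list and takes the first unused name
lemma pvLoopA_eq (old : List String) (p : String) :
    ∀ fuel chars c, (∀ d ∈ c, d < 26) → c.length ≤ chars → chars ≤ 4 →
    ((pvFrom (c ++ List.replicate (chars - c.length) 0) ++ pvRest chars).length ≤ fuel) →
    pvLoopA old p fuel chars c =
      ((pvFrom (c ++ List.replicate (chars - c.length) 0) ++ pvRest chars).map (pvToStr p)).find?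
        (fun s => !(old.contains s)) := by
  intro fuel
  induction fuel with
  | zero =>
    intro chars c hlt _ _ hfuel
    exfalso
    have h1 : ∀ d ∈ c ++ List.replicate (chars - c.length) 0, d < 26 := by
      intro d hd
      rcases List.mem_append.1 hd with h | h
      · exact hlt d h
      · simp [List.eq_of_mem_replicate h]
    have := pvFrom_ne_nil _ h1
    cases hpf : pvFrom (c ++ List.replicate (chars - c.length) 0) with
    | nil => exact this hpf
    | cons a l => rw [hpf] at hfuel; simp at hfuel
  | succ fuel ih =>
    intro chars c hlt hle h4 hfuel
    set cp := c ++ List.replicate (chars - c.length) 0 with hcp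
    have hcplt : ∀ d ∈ cp, d < 26 := by
      intro d hd
      rcases List.mem_append.1 hd with h | h
      · exact hlt d h
      · simp [List.eq_of_mem_replicate h]
    have hcplen : cp.length = chars := by simp [hcp]; omega
    have hstep := pvFrom_step cp hcplt
    rw [hstep]
    simp only [pvLoopA, ← hcp]
    rw [List.cons_append, List.map_cons, List.find?_cons]
    cases hi : pvInc cp with
    | some c' =>
      by_cases hmem : (p ++ String.ofList (cp.map pvChr)) ∈ old
      · have hlen' : c'.length = chars := by rw [pvInc_length cp c' hi]; exact hcplen
        have hpad : c' ++ List.replicate (chars - c'.length) 0 = c' := by simp [hlen']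
        have hbound : (pvFrom (c' ++ List.replicate (chars - c'.length) 0) ++
            pvRest chars).length ≤ fuel := by
          rw [hpad]
          rw [hstep, hi] at hfuel
          simp at hfuel ⊢
          omega
        have hIH := ih chars c' (pvInc_lt cp c' hcplt hi) (le_of_eq hlen') h4 hbound
        rw [hpad] at hIH
        simp [hmem, pvToStr, hIH]
      · simp [hmem, pvToStr]
    | none =>
      by_cases hmem : (p ++ String.ofList (cp.map pvChr)) ∈ old
      · by_cases h5 : chars + 1 ≥ 5
        · have hc4 : chars = 4 := by omega
          have hr4 : pvRest chars = [] := by simp [pvRest, hc4]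
          simp [hmem, pvToStr, h5, hr4]
        · have hch : chars ≤ 3 := by omega
          have hzlen : (List.replicate cp.length 0).length ≤ chars + 1 := by simp [hcplen]
          have hpad : List.replicate cp.length 0 ++
              List.replicate ((chars + 1) - (List.replicate cp.length 0).length) 0 =
              List.replicate (chars + 1) 0 := by
            simp only [List.length_replicate, hcplen]
            rw [← List.replicate_add]
            congr 1
            omega
          have hrest : pvRest chars = pvTuples (chars + 1) ++ pvRest (chars + 1) := by
            simp only [pvRest]
            have h43 : 4 - chars = (4 - (chars + 1)) + 1 := by omega
            rw [h43, List.range'_succ, List.flatMap_cons]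
          have hbound : (pvFrom (List.replicate cp.length 0 ++
              List.replicate ((chars + 1) - (List.replicate cp.length 0).length) 0) ++
              pvRest (chars + 1)).length ≤ fuel := by
            rw [hpad, pvFrom_zero, ← hrest]
            rw [hstep, hi] at hfuel
            simp at hfuel ⊢
            omega
          have hIH := ih (chars + 1) (List.replicate cp.length 0)
            (by intro d hd; simp [List.eq_of_mem_replicate hd]) hzlen (by omega) hbound
          rw [hpad, pvFrom_zero, ← hrest] at hIH
          simp [hmem, pvToStr, h5, hIH]
      · simp [hmem, pvToStr]

-- bridge: B's recursive name generator is the digit-tuple list rendered through the prefix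
lemma pvNames_eq : ∀ n (pre : String),
    pvNames pre n = (pvTuples n).map (fun t => pre ++ String.ofList (t.map pvChr)) := by
  intro n
  induction n with
  | zero =>
    intro pre
    simp only [pvNames, pvTuples, List.map_cons, List.map_nil]
    congr 1
    rw [← String.toList_inj]
    simp only [String.toList_append, String.toList_ofList, List.append_nil]
  | succ n ih =>
    intro pre
    have halph : pvAlph = (List.range 26).map pvChr := by decide
    simp only [pvNames, pvTuples, halph, List.flatMap_map, List.map_flatMap]
    congr 1
    funext d
    rw [ih, List.map_map]
    apply List.map_congr_left
    intro t _
    show pre.push (pvChr d) ++ String.ofList (t.map pvChr) = pre ++ String.ofList (pvChr d :: t.map pvChr)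
    rw [← String.toList_inj]
    simp only [String.toList_append, String.toList_push, String.toList_ofList,
      List.append_assoc, List.singleton_append]

-- the candidate list both programs scan
lemma pvInitial_list :
    pvFrom ([] ++ List.replicate (1 - ([] : List Nat).length) 0) ++ pvRest 1 =
      (List.range' 1 4).flatMap pvTuples := by
  have h1 : ([] : List Nat) ++ List.replicate (1 - ([] : List Nat).length) 0 =
      List.replicate 1 0 := by simp
  rw [h1, pvFrom_zero]
  have h2 : List.range' 1 4 = 1 :: List.range' 2 3 := by decide
  rw [h2, List.flatMap_cons]
  rfl

lemma pvInitial_length :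
    (pvFrom ([] ++ List.replicate (1 - ([] : List Nat).length) 0) ++ pvRest 1).length
      ≤ 500000 := by
  rw [pvInitial_list]
  have h2 : List.range' 1 4 = [1, 2, 3, 4] := by decide
  simp [h2, pvTuples_length]

-- ===== VERDICT (by name: the statement is the Claim_ definition above) =====
theorem gen_new_cluster_spec : Claim_equal_gen_new_cluster := by
  unfold Claim_equal_gen_new_cluster
  intro old_clusters cluster_prefix _
  unfold Spec_gen_new_cluster gen_new_cluster gen_new_cluster_alt
  rw [pvLoopA_eq old_clusters (cluster_prefix.getD "") 500000 1 []
    (by simp) (by simp) (by omega) pvInitial_length]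
  rw [pvInitial_list]
  congr 1
  rw [List.map_flatMap]
  apply List.flatMap_congr
  intro l _
  rw [pvNames_eq]
  rfl
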